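-- pv_equiv track=rewrite | github.com/hyobin0726/Algorithm | 프로그래머스/1/1845. 폰켓몬/폰켓몬.py | solution
-- ===== SOURCE A (Python) =====
-- def solution(nums):
--     answer = 0
--     phone=set()
--     for i in nums :
--
--         if len(phone)<len(nums)//2:
--             phone.add(i)
--         else:
--             break
--
--     return len(phone)
-- ===== SOURCE B (Python) =====
-- def solution(nums):
--     return min(len(set(nums)), len(nums) // 2)
-- ===== Notes on version B (the rewrite author's own statement) =====
-- stated objective: simpler
-- what changed: Replaced the guarded loop with early break by the closed form min(len(set(nums)), len(nums)//2).
import Mathlib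
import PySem

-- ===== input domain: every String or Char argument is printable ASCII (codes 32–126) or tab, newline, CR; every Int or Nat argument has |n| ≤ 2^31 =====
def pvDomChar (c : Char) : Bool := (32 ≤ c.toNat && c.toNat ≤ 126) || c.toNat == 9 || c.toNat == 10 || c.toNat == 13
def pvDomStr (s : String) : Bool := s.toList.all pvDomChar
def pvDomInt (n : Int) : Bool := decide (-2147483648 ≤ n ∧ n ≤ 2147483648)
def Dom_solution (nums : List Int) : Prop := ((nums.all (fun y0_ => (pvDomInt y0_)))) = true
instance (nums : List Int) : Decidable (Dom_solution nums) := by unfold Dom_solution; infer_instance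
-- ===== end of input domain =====

-- B replaces A's guarded loop-with-break by the closed form min(len(set(nums)), len(nums)//2) (simpler).


-- ===== PORT A =====
-- the for-loop with its break: stops at the first element for which len(phone) < len(nums)//2 fails
def solutionLoopA (half : Int) : List Int → PySem.Set Int → PySem.Set Int
  | [], phone => phone
  | i :: rest, phone =>
      if (PySem.Set.len phone) < half then solutionLoopA half rest (PySem.Set.add phone i)
      else phone

def solution (nums : List Int) : Int :=
  let phone := solutionLoopA (PySem.Int.floordiv (nums.length : Int) 2) nums PySem.Set.empty
  PySem.Set.len phone

-- ===== PORT B =====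
def solution_alt (nums : List Int) : Int :=
  min (PySem.Set.len (PySem.Set.ofList nums)) (PySem.Int.floordiv (nums.length : Int) 2)

-- ===== PRECONDITION & SPEC =====
def Spec_solution (nums : List Int) (out : Int) : Prop := out = solution_alt nums
instance (nums : List Int) (out : Int) : Decidable (Spec_solution nums out) := by unfold Spec_solution; infer_instance

-- ===== CLAIM (what is proved, stated in full; the proofs are below) =====
def Claim_equal_solution : Prop := ∀ (nums : List Int), Dom_solution nums → Spec_solution nums (solution nums)

-- ===== LEMMAS AND PROOFS =====

theorem len_add_le (s : PySem.Set Int) (x : Int) :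
    PySem.Set.len (PySem.Set.add s x) ≤ PySem.Set.len s + 1 := by
  simp only [PySem.Set.len, PySem.Set.add]
  split <;> simp

theorem len_le_len_update (s : PySem.Set Int) (l : List Int) :
    PySem.Set.len s ≤ PySem.Set.len (PySem.Set.update s l) := by
  induction l generalizing s with
  | nil => simp [PySem.Set.update]
  | cons x xs ih =>
      rw [PySem.Set.update_cons]
      calc PySem.Set.len s ≤ PySem.Set.len (PySem.Set.add s x) := by
            simp only [PySem.Set.len, PySem.Set.add]; split <;> simp
        _ ≤ _ := ih _

theorem loopA_eq (half : Int) (l : List Int) (s : PySem.Set Int)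
    (hle : PySem.Set.len s ≤ half) :
    PySem.Set.len (solutionLoopA half l s)
      = min (PySem.Set.len (PySem.Set.update s l)) half := by
  induction l generalizing s with
  | nil =>
      show PySem.Set.len s = min (PySem.Set.len (PySem.Set.update s [])) half
      rw [show PySem.Set.update s [] = s from rfl]
      exact (min_eq_left hle).symm
  | cons i rest ih =>
      rw [solutionLoopA, PySem.Set.update_cons]
      split
      · rename_i hlt
        exact ih (PySem.Set.add s i) (le_trans (len_add_le s i) (by omega))
      · rename_i hnlt
        have hs : PySem.Set.len s = half := le_antisymm hle (by omega)
        have := len_le_len_update (PySem.Set.add s i) rest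
        have h2 : PySem.Set.len s ≤ PySem.Set.len (PySem.Set.add s i) := by
          simp only [PySem.Set.len, PySem.Set.add]; split <;> simp
        omega

-- ===== VERDICT (by name: the statement is the Claim_ definition above) =====
theorem solution_spec : Claim_equal_solution := by
  intro nums _
  show solution nums = solution_alt nums
  unfold solution solution_alt
  have h0 : PySem.Set.len (PySem.Set.empty (α := Int)) ≤ PySem.Int.floordiv (nums.length : Int) 2 := by
    simp only [PySem.Set.len, PySem.Set.empty, List.length_nil, Nat.cast_zero]
    rw [show ((2:Int)) = ((2:Nat):Int) from rfl, PySem.Int.floordiv_natCast]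
    exact_mod_cast Nat.zero_le _
  rw [loopA_eq _ _ _ h0,
    show PySem.Set.update (PySem.Set.empty) nums = PySem.Set.ofList nums from PySem.Set.update_nil_left nums]
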